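-- pv_equiv track=rewrite | github.com/baekhangyeol/CodingTest_Practice | 프로그래머스/3/64062. 징검다리 건너기/징검다리 건너기.py | checkUnderZero
-- ===== SOURCE A (Python) =====
-- def checkUnderZero(stones, k, friends):
--     count = 0
--
--     for stone in stones:
--         if stone - friends < 0:
--             count += 1
--         else:
--             count = 0
--
--         if count >= k:
--             return False
--
--     return True
-- ===== SOURCE B (Python) =====
-- from itertools import groupby
--
-- def checkUnderZero(stones, k, friends):
--     for below, group in groupby(stones, key=lambda s: s - friends < 0):
--         if below and len(list(group)) >= k:
--             return False
--     return True
-- ===== Notes on version B (the rewrite author's own statement) =====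
-- stated objective: idiomatic
-- what changed: Replaces the reset-counter loop with itertools.groupby: stones are split into maximal runs of equal below-threshold flag and B returns whether no below-threshold run has length >= k.
-- intended difference: For k <= 0 with nonempty stones none of which drop below the threshold, A returns False because its 'count >= k' test fires with count 0 after a non-below stone, while B returns True, the intended value since no below-threshold run exists at all. — e.g. on checkUnderZero([0], 0, 0): A returns false, B returns true
import Mathlib
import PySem

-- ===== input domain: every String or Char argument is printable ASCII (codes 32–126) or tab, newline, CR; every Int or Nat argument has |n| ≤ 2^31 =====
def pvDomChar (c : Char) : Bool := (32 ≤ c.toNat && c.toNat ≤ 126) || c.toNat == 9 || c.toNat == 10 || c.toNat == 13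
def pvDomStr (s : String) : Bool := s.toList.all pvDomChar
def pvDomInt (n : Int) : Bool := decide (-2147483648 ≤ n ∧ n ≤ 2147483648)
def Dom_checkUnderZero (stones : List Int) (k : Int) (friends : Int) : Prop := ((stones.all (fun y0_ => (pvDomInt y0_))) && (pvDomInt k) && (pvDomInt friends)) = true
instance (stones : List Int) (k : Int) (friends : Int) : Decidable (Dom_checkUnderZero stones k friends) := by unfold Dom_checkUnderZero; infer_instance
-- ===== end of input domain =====

-- B replaces A's reset-counter loop with a groupby decomposition into maximal runs
-- (idiomatic, same cost); on the degenerate corner k ≤ 0 with no below-threshold stone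
-- B returns the intended True, stated as D_ below.

-- ===== PORT A =====
-- the for-loop with its `count` accumulator and early return
def goA_checkUnderZero (friends k : Int) : List Int → Int → Bool
  | [], _ => true
  | stone :: rest, count =>
    let c := if stone - friends < 0 then count + 1 else 0
    if c ≥ k then false else goA_checkUnderZero friends k rest c

def checkUnderZero (stones : List Int) (k : Int) (friends : Int) : Bool :=
  goA_checkUnderZero friends k stones 0

-- ===== PORT B =====
-- itertools.groupby on the flag (s - friends < 0): maximal runs as (flag, length) pairs
def pvRuns (friends : Int) : List Int → List (Bool × Nat)
  | [] => []
  | s :: rest =>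
    let b := decide (s - friends < 0)
    match pvRuns friends rest with
    | [] => [(b, 1)]
    | (b', n) :: rs => if b = b' then (b, n + 1) :: rs else (b, 1) :: (b', n) :: rs

def checkUnderZero_alt (stones : List Int) (k : Int) (friends : Int) : Bool :=
  (pvRuns friends stones).all (fun p => !(p.1 && decide (k ≤ (p.2 : Int))))

-- ===== PRECONDITION & SPEC =====
-- For k ≤ 0 with nonempty stones none of which drop below the threshold, A returns False
-- (its `count >= k` test fires with count 0), while B returns True, the intended value
-- since no below-threshold run exists at all.
def D_checkUnderZero (stones : List Int) (k : Int) (friends : Int) : Prop :=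
  k ≤ 0 ∧ stones ≠ [] ∧ ∀ s ∈ stones, ¬ (s - friends < 0)
instance (stones : List Int) (k : Int) (friends : Int) : Decidable (D_checkUnderZero stones k friends) := by unfold D_checkUnderZero; infer_instance

def Spec_checkUnderZero (stones : List Int) (k : Int) (friends : Int) (out : Bool) : Prop :=
  ¬ D_checkUnderZero stones k friends → out = checkUnderZero_alt stones k friends
instance (stones : List Int) (k : Int) (friends : Int) (out : Bool) : Decidable (Spec_checkUnderZero stones k friends out) := by unfold Spec_checkUnderZero; infer_instance

def pvDiffWitness_checkUnderZero : List Int × Int × Int := ([0], 0, 0)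
def pvDiffWitnessOut_checkUnderZero : Bool × Bool := (false, true)

-- ===== CLAIM (what is proved, stated in full; the proofs are below) =====
def Claim_unchanged_checkUnderZero : Prop := ∀ (stones : List Int) (k : Int) (friends : Int), Dom_checkUnderZero stones k friends → Spec_checkUnderZero stones k friends (checkUnderZero stones k friends)
def Claim_changed_checkUnderZero : Prop := Dom_checkUnderZero (pvDiffWitness_checkUnderZero.1) (pvDiffWitness_checkUnderZero.2.1) (pvDiffWitness_checkUnderZero.2.2) ∧ D_checkUnderZero (pvDiffWitness_checkUnderZero.1) (pvDiffWitness_checkUnderZero.2.1) (pvDiffWitness_checkUnderZero.2.2) ∧ checkUnderZero (pvDiffWitness_checkUnderZero.1) (pvDiffWitness_checkUnderZero.2.1) (pvDiffWitness_checkUnderZero.2.2) = pvDiffWitnessOut_checkUnderZero.1 ∧ checkUnderZero_alt (pvDiffWitness_checkUnderZero.1) (pvDiffWitness_checkUnderZero.2.1) (pvDiffWitness_checkUnderZero.2.2) = pvDiffWitnessOut_checkUnderZero.2 ∧ pvDiffWitnessOut_checkUnderZero.1 ≠ pvDiffWitnessOut_checkUnderZero.2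
def Claim_exact_checkUnderZero : Prop := ∀ (stones : List Int) (k : Int) (friends : Int), Dom_checkUnderZero stones k friends → D_checkUnderZero stones k friends → checkUnderZero stones k friends ≠ checkUnderZero_alt stones k friends

-- ===== LEMMAS AND PROOFS =====

-- value of B's check applied to a run list
def allOk (k : Int) (rs : List (Bool × Nat)) : Bool :=
  rs.all (fun p => !(p.1 && decide (k ≤ (p.2 : Int))))

-- A's loop, for k ≥ 1, computes B's run check, with the carry `c` added to a
-- leading below-threshold run
theorem goA_runs (friends k : Int) (hk : 1 ≤ k) :
    ∀ (l : List Int) (c : Int),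
      goA_checkUnderZero friends k l c =
        (match pvRuns friends l with
         | (true, n) :: rs => if k ≤ c + (n : Int) then false else allOk k rs
         | other => allOk k other) := by
  intro l
  induction l with
  | nil => intro c; simp [goA_checkUnderZero, pvRuns, allOk]
  | cons s rest ih =>
    intro c
    by_cases hb : s - friends < 0
    · -- below-threshold stone
      by_cases hkc : c + 1 ≥ k
      · -- early return false
        have h1 : goA_checkUnderZero friends k (s :: rest) c = false := by
          simp [goA_checkUnderZero, hb, hkc]
        rw [h1]
        simp only [pvRuns, hb, decide_true]
        cases hr : pvRuns friends rest with
        | nil => simp; omega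
        | cons p rs =>
          obtain ⟨b', n⟩ := p
          cases b' with
          | true => simp; omega
          | false => simp; omega
      · have h1 : goA_checkUnderZero friends k (s :: rest) c =
            goA_checkUnderZero friends k rest (c + 1) := by
          simp [goA_checkUnderZero, hb]; omega
        rw [h1, ih (c + 1)]
        simp only [pvRuns, hb, decide_true]
        cases hr : pvRuns friends rest with
        | nil => simp [allOk]; omega
        | cons p rs =>
          obtain ⟨b', n⟩ := p
          cases b' with
          | true =>
            have : (c + 1 + (n : Int)) = c + ((n : Nat) + 1 : Nat) := by push_cast; ring
            simp [this]
          | false =>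
            have hck : ¬ k ≤ c + ((1 : Nat) : Int) := by push_cast; omega
            simp only [Bool.true_eq_false, reduceIte, if_neg hck]
    · -- non-below stone: count resets to 0, which is < k
      have h1 : goA_checkUnderZero friends k (s :: rest) c =
          goA_checkUnderZero friends k rest 0 := by
        simp [goA_checkUnderZero, hb]; omega
      rw [h1, ih 0]
      simp only [pvRuns, hb, decide_false]
      cases hr : pvRuns friends rest with
      | nil => simp [allOk]
      | cons p rs =>
        obtain ⟨b', n⟩ := p
        cases b' with
        | true =>
          simp [allOk]
        | false =>
          simp [allOk]

-- for k ≤ 0, B's check is: no stone is below the threshold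
theorem alt_nonpos (friends k : Int) (hk : k ≤ 0) (l : List Int) :
    checkUnderZero_alt l k friends = l.all (fun s => !decide (s - friends < 0)) := by
  induction l with
  | nil => simp [checkUnderZero_alt, pvRuns]
  | cons s rest ih =>
    by_cases hb : s - friends < 0
    · -- head run is below-threshold and nonempty, so the check fails
      have hR : (s :: rest).all (fun s => !decide (s - friends < 0)) = false := by
        simp only [List.all_cons, hb, decide_true, Bool.not_true, Bool.false_and]
      rw [hR]
      simp only [checkUnderZero_alt, pvRuns, hb, decide_true]
      cases hr : pvRuns friends rest with
      | nil => simp; omega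
      | cons p rs =>
        obtain ⟨b', n⟩ := p
        cases b' with
        | true => simp; omega
        | false => simp; omega
    · have hR : (s :: rest).all (fun s => !decide (s - friends < 0)) =
          rest.all (fun s => !decide (s - friends < 0)) := by
        simp only [List.all_cons, hb, decide_false, Bool.not_false, Bool.true_and]
      rw [hR, ← ih]
      simp only [checkUnderZero_alt, pvRuns, hb, decide_false]
      cases hr : pvRuns friends rest with
      | nil => simp
      | cons p rs =>
        obtain ⟨b', n⟩ := p
        cases b' with
        | true => simp
        | false => simp

-- for k ≤ 0, A returns false on any nonempty input
theorem goA_nonpos (friends k : Int) (hk : k ≤ 0) (s : Int) (rest : List Int) (c : Int)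
    (hc : 0 ≤ c) : goA_checkUnderZero friends k (s :: rest) c = false := by
  by_cases hb : s - friends < 0 <;> simp [goA_checkUnderZero, hb] <;> omega

-- ===== VERDICT (by name: the statement is the Claim_ definition above) =====
theorem checkUnderZero_spec : Claim_unchanged_checkUnderZero := by
  intro stones k friends _ hnd
  by_cases hk : 1 ≤ k
  · rw [show checkUnderZero stones k friends = goA_checkUnderZero friends k stones 0 from rfl,
      goA_runs friends k hk stones 0]
    simp only [checkUnderZero_alt]
    cases hr : pvRuns friends stones with
    | nil => simp [allOk]
    | cons p rs =>
      obtain ⟨b', n⟩ := p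
      cases b' with
      | true => simp [allOk]
      | false => simp [allOk]
  · have hk0 : k ≤ 0 := by omega
    cases stones with
    | nil => simp [checkUnderZero, goA_checkUnderZero, checkUnderZero_alt, pvRuns]
    | cons s rest =>
      have hne : (s :: rest : List Int) ≠ [] := by simp
      have hex : ¬ ∀ x ∈ (s :: rest : List Int), ¬ (x - friends < 0) := by
        intro hall
        exact hnd ⟨hk0, hne, hall⟩
      push Not at hex
      obtain ⟨x, hx, hxb⟩ := hex
      rw [show checkUnderZero (s :: rest) k friends =
            goA_checkUnderZero friends k (s :: rest) 0 from rfl,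
        goA_nonpos friends k hk0 s rest 0 (le_refl 0),
        alt_nonpos friends k hk0]
      symm
      simp only [List.all_eq_false]
      exact ⟨x, hx, by simp [hxb]⟩

theorem checkUnderZero_changed : Claim_changed_checkUnderZero := by
  unfold Claim_changed_checkUnderZero; decide

theorem checkUnderZero_tight : Claim_exact_checkUnderZero := by
  intro stones k friends _ hd
  obtain ⟨hk0, hne, hall⟩ := hd
  cases stones with
  | nil => exact absurd rfl hne
  | cons s rest =>
    rw [show checkUnderZero (s :: rest) k friends =
          goA_checkUnderZero friends k (s :: rest) 0 from rfl,
      goA_nonpos friends k hk0 s rest 0 (le_refl 0),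
      alt_nonpos friends k hk0]
    have hA : (s :: rest).all (fun x => !decide (x - friends < 0)) = true := by
      simp only [List.all_eq_true]
      intro x hx
      simp [hall x hx]
    rw [hA]
    simp
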